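-- pv_equiv track=rewrite | github.com/161sam/open-controller-workbench | ocf_freecad/services/controller_service.py | _next_component_id
-- ===== SOURCE A (Python) =====
-- from typing import Any
--
-- def _next_component_id(components: list[dict[str, Any]], component_type: str) -> str:
--     prefix = {
--         "encoder": "enc",
--         "button": "btn",
--         "display": "disp",
--         "fader": "fader",
--         "pad": "pad",
--         "rgb_button": "rgb",
--     }.get(component_type, "comp")
--     index = 1
--     existing_ids = {component["id"] for component in components}
--     while f"{prefix}{index}" in existing_ids:
--         index += 1
--     return f"{prefix}{index}"
-- ===== SOURCE B (Python) =====
-- def _next_component_id(components, component_type):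
--     prefix = {
--         "encoder": "enc",
--         "button": "btn",
--         "display": "disp",
--         "fader": "fader",
--         "pad": "pad",
--         "rgb_button": "rgb",
--     }.get(component_type, "comp")
--     bound = len(components) + 1  # the answer's index never exceeds len(components) + 1
--     numeral = {str(i): i for i in range(1, bound + 1)}
--     seen = [False] * (bound + 1)
--     plen = len(prefix)
--     for component in components:
--         cid = component["id"]
--         if cid.startswith(prefix):
--             i = numeral.get(cid[plen:])
--             if i is not None:
--                 seen[i] = True
--     expected = 1
--     while seen[expected]:
--         expected += 1
--     return f"{prefix}{expected}"
-- ===== Notes on version B (the rewrite author's own statement) =====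
-- stated objective: alternative
-- what changed: A probes prefix1, prefix2, ... against a set of all ids until the first miss; B instead makes one pass over the components, marking used candidate indices 1..len(components)+1 in a boolean table via a str(i)->i dictionary, then returns the first unmarked index.
import Mathlib
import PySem

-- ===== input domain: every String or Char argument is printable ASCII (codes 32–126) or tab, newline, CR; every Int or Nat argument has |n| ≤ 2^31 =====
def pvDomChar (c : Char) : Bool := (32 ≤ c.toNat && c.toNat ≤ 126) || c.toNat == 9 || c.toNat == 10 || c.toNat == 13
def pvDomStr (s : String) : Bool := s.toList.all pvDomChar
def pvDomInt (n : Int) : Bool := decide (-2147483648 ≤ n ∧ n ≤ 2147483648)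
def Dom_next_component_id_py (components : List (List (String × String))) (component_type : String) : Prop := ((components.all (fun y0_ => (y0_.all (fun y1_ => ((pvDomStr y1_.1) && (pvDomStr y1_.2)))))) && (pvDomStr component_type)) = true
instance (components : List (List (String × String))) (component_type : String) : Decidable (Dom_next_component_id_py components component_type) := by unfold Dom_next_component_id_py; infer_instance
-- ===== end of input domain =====

-- B replaces A's unbounded probe loop ("try prefix1, prefix2, … against a set") by one pass that
-- marks, in a boolean table indexed through a numeral→index dictionary, which candidate indices
-- 1..len(components)+1 are already used, then takes the first unmarked index (objective: alternative).
-- Equivalence is about the RETURN value; neither program mutates its arguments.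

-- ===== PORT A =====
-- the Python dict literal whose .get(component_type, "comp") picks the prefix
def pvPrefixTable : PySem.Dict String String :=
  ⟨[("encoder", "enc"), ("button", "btn"), ("display", "disp"),
    ("fader", "fader"), ("pad", "pad"), ("rgb_button", "rgb")]⟩

-- component["id"]: Pre_ guarantees the key is present (KeyError otherwise), so the
-- `.getD ""` default is never taken on admitted inputs.
def pvGetId (component : List (String × String)) : String :=
  (PySem.Dict.get? ⟨component⟩ "id").getD ""

-- the `while f"{prefix}{index}" in existing_ids: index += 1` loop; the fuel |existing_ids|+1
-- supplied below is proved sufficient (pigeonhole), so the fuel-0 arm is unreachable.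
def pvLoopA (existing : PySem.Set String) (pfx : String) : Nat → Int → String
  | 0, index => pfx ++ PySem.Int.toStr index
  | fuel + 1, index =>
      if (pfx ++ PySem.Int.toStr index) ∈ existing then
        pvLoopA existing pfx fuel (index + 1)
      else
        pfx ++ PySem.Int.toStr index

def next_component_id_py (components : List (List (String × String))) (component_type : String) : String :=
  let pfx := PySem.Dict.getD pvPrefixTable component_type "comp"
  let existing : PySem.Set String := PySem.Set.ofList (components.map pvGetId)
  pvLoopA existing pfx (existing.length + 1) 1

-- ===== PORT B =====
-- one component's marking step: if its id is the prefix followed by a numeral known to the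
-- dictionary, set that slot of `seen`; the dictionary's values are ≥ 1, so `.toNat` is exact.
def pvMark (pfx : String) (numeral : PySem.Dict String Int) (seen : List Bool)
    (component : List (String × String)) : List Bool :=
  let cid := (PySem.Dict.get? ⟨component⟩ "id").getD ""
  if PySem.Str.startswith cid pfx then
    match PySem.Dict.get? numeral (PySem.Str.slice cid (some (PySem.Str.len pfx)) none) with
    | some i => seen.set i.toNat true
    | none => seen
  else seen

-- the `while seen[expected]: expected += 1` loop; expected stays ≤ bound (proved below), so
-- the fuel `bound` supplied below suffices and the out-of-range `.getD false` arm is unreachable.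
def pvLoopB (seen : List Bool) : Nat → Int → Int
  | 0, expected => expected
  | fuel + 1, expected =>
      if (PySem.List.pyGet? seen expected).getD false then pvLoopB seen fuel (expected + 1)
      else expected

def next_component_id_py_alt (components : List (List (String × String))) (component_type : String) : String :=
  let pfx := PySem.Dict.getD pvPrefixTable component_type "comp"
  let bound : Int := (components.length : Int) + 1
  let numeral : PySem.Dict String Int :=
    (PySem.List.pyRange 1 (bound + 1)).foldl (fun d i => d.insert (PySem.Int.toStr i) i) ⟨[]⟩
  let seen0 : List Bool := PySem.List.pyRepeat [false] (bound + 1)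
  let seen := components.foldl (pvMark pfx numeral) seen0
  pfx ++ PySem.Int.toStr (pvLoopB seen bound.toNat 1)

-- ===== PRECONDITION & SPEC =====
-- Pre_ excludes exactly the inputs on which A raises KeyError: a component without an "id" key.
def Pre_next_component_id_py (components : List (List (String × String))) (component_type : String) : Prop :=
  (components.all (fun c => PySem.Dict.contains ⟨c⟩ "id")) = true
instance (components : List (List (String × String))) (component_type : String) : Decidable (Pre_next_component_id_py components component_type) := by unfold Pre_next_component_id_py; infer_instance

def pvWitness_next_component_id_py : (List (List (String × String))) × String :=
  ([[("id", "enc1")], [("id", "x")]], "encoder")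

def Spec_next_component_id_py (components : List (List (String × String))) (component_type : String) (out : String) : Prop := out = next_component_id_py_alt components component_type
instance (components : List (List (String × String))) (component_type : String) (out : String) : Decidable (Spec_next_component_id_py components component_type out) := by unfold Spec_next_component_id_py; infer_instance

-- ===== CLAIM (what is proved, stated in full; the proofs are below) =====
def Claim_equal_next_component_id_py : Prop := ∀ (components : List (List (String × String))) (component_type : String), Dom_next_component_id_py components component_type → Pre_next_component_id_py components component_type → Spec_next_component_id_py components component_type (next_component_id_py components component_type)

-- ===== LEMMAS AND PROOFS =====

-- ---- decimal numerals: `str(n)` decodes back to n, hence is injective on the nonnegatives ----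

lemma pvDigitChar_decode : ∀ k, k < 10 → (Nat.digitChar k).toNat - 48 = k := by decide

lemma pvVal_toDigitsCore : ∀ (f n : Nat) (acc : List Char), n < f →
    (Nat.toDigitsCore 10 f n acc).foldl (fun a c => 10 * a + (c.toNat - 48)) 0
      = acc.foldl (fun a c => 10 * a + (c.toNat - 48)) n := by
  intro f
  induction f with
  | zero => intro n acc h; omega
  | succ f ih =>
    intro n acc h
    rw [Nat.toDigitsCore]
    by_cases hz : n / 10 = 0
    · have hn : n < 10 := by omega
      simp only [hz, if_true, List.foldl]
      rw [pvDigitChar_decode (n % 10) (by omega)]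
      congr 1
      omega
    · have h10 : 10 ≤ n := by
        rcases Nat.lt_or_ge n 10 with h' | h'
        · exact absurd (Nat.div_eq_of_lt h') hz
        · exact h'
      have hlt : n / 10 < f := by
        have := Nat.div_lt_self (by omega : 0 < n) (by omega : 1 < 10)
        omega
      simp only [hz, if_false]
      rw [ih (n / 10) _ hlt]
      simp only [List.foldl]
      rw [pvDigitChar_decode (n % 10) (by omega)]
      congr 1
      omega

lemma pvVal_toDigits (n : Nat) :
    (Nat.toDigits 10 n).foldl (fun a c => 10 * a + (c.toNat - 48)) 0 = n := by
  rw [Nat.toDigits, pvVal_toDigitsCore (n + 1) n [] (by omega)]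
  rfl

lemma pvToStr_inj {a b : Int} (ha : 0 ≤ a) (hb : 0 ≤ b)
    (h : PySem.Int.toStr a = PySem.Int.toStr b) : a = b := by
  have h' : PySem.Int.toChars a = PySem.Int.toChars b := by
    rw [← PySem.Int.toList_toStr, ← PySem.Int.toList_toStr, h]
  rw [PySem.Int.toChars, PySem.Int.toChars, if_neg (by omega), if_neg (by omega)] at h'
  have := congrArg (fun l => l.foldl (fun a c => 10 * a + (c.toNat - 48)) 0) h'
  simp only [pvVal_toDigits] at this
  omega

lemma pvAppend_toStr_inj (pfx : String) {a b : Int} (ha : 0 ≤ a) (hb : 0 ≤ b)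
    (h : pfx ++ PySem.Int.toStr a = pfx ++ PySem.Int.toStr b) : a = b := by
  apply pvToStr_inj ha hb
  apply String.toList_inj.mp
  have := congrArg String.toList h
  rw [String.toList_append, String.toList_append] at this
  exact List.append_cancel_left this

-- ---- decomposing an id as prefix ++ remainder ----

lemma pvDecomp (cid pfx r : String) :
    (PySem.Str.startswith cid pfx = true ∧
      PySem.Str.slice cid (some (PySem.Str.len pfx)) none = r)
    ↔ cid = pfx ++ r := by
  constructor
  · rintro ⟨hsw, hsl⟩
    rw [PySem.Str.startswith_eq, PySem.Chars.startswith_iff] at hsw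
    obtain ⟨t, ht⟩ := hsw
    apply String.toList_inj.mp
    rw [String.toList_append, ← ht]
    have := congrArg String.toList hsl
    rw [PySem.Str.toList_slice, PySem.Chars.slice_eq_listSlice, PySem.Str.len_eq,
      PySem.List.slice_from _ (by positivity)] at this
    simp only [Int.toNat_natCast] at this
    rw [← this, ← ht, List.drop_left]
  · rintro rfl
    constructor
    · rw [PySem.Str.startswith_eq, PySem.Chars.startswith_iff, String.toList_append]
      exact List.prefix_append _ _
    · apply String.toList_inj.mp
      rw [PySem.Str.toList_slice, PySem.Chars.slice_eq_listSlice, PySem.Str.len_eq,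
        PySem.List.slice_from _ (by positivity)]
      simp only [Int.toNat_natCast, String.toList_append, List.drop_left]

-- ---- the numeral → index dictionary ----

lemma pvKeys_nodup (bound : Int) :
    ((PySem.List.pyRange 1 (bound + 1)).map PySem.Int.toStr).Nodup := by
  apply List.Nodup.map_on _ (PySem.List.nodup_pyRange_one _ _)
  intro x hx y hy h
  rw [PySem.List.mem_pyRange_one] at hx hy
  exact pvToStr_inj (by omega) (by omega) h

lemma pvNumeral_items (bound : Int) :
    ((PySem.List.pyRange 1 (bound + 1)).foldl
        (fun d i => d.insert (PySem.Int.toStr i) i) (⟨[]⟩ : PySem.Dict String Int)).items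
      = (PySem.List.pyRange 1 (bound + 1)).map (fun i => (PySem.Int.toStr i, i)) := by
  rw [PySem.Dict.items_foldl_insert_fresh _ _ _ _ (fun a _ => rfl) (pvKeys_nodup bound)]
  rfl

lemma pvGet?_map_some {l : List Int} {r : String} {k : Int}
    (h : PySem.Dict.get? (⟨l.map (fun i => (PySem.Int.toStr i, i))⟩ : PySem.Dict String Int) r
      = some k) : k ∈ l ∧ r = PySem.Int.toStr k := by
  induction l with
  | nil => simp [PySem.Dict.get?] at h
  | cons i t ih =>
    simp only [List.map_cons, PySem.Dict.get?, List.find?] at h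
    by_cases hb : (PySem.Int.toStr i == r) = true
    · simp only [hb, Option.map_some] at h
      obtain rfl : i = k := by simpa using h
      exact ⟨List.mem_cons_self, (eq_of_beq hb).symm⟩
    · simp only [hb] at h
      have := ih (by simpa [PySem.Dict.get?] using h)
      exact ⟨List.mem_cons_of_mem _ this.1, this.2⟩

lemma pvGet?_map_self {l : List Int} {k : Int} (hk : k ∈ l)
    (hnd : (l.map PySem.Int.toStr).Nodup) :
    PySem.Dict.get? (⟨l.map (fun i => (PySem.Int.toStr i, i))⟩ : PySem.Dict String Int)
      (PySem.Int.toStr k) = some k := by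
  induction l with
  | nil => simp at hk
  | cons i t ih =>
    simp only [List.map_cons, List.nodup_cons] at hnd
    rcases List.mem_cons.mp hk with rfl | hk'
    · simp [PySem.Dict.get?]
    · have hne : (PySem.Int.toStr i == PySem.Int.toStr k) = false := by
        apply beq_false_of_ne
        intro he
        exact hnd.1 (he ▸ List.mem_map_of_mem hk')
      simp only [PySem.Dict.get?, List.map_cons, List.find?_cons, hne]
      exact ih hk' hnd.2

lemma pvNumeral_get?_eq_some {bound : Int} {r : String} {k : Int}
    (h : PySem.Dict.get?
        ((PySem.List.pyRange 1 (bound + 1)).foldl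
          (fun d i => d.insert (PySem.Int.toStr i) i) (⟨[]⟩ : PySem.Dict String Int)) r = some k) :
    1 ≤ k ∧ k ≤ bound ∧ r = PySem.Int.toStr k := by
  rw [show (PySem.Dict.get?
        ((PySem.List.pyRange 1 (bound + 1)).foldl
          (fun d i => d.insert (PySem.Int.toStr i) i) (⟨[]⟩ : PySem.Dict String Int)) r)
      = PySem.Dict.get? (⟨(PySem.List.pyRange 1 (bound + 1)).map
          (fun i => (PySem.Int.toStr i, i))⟩ : PySem.Dict String Int) r from by
    unfold PySem.Dict.get?; rw [pvNumeral_items]] at h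
  obtain ⟨hm, hr⟩ := pvGet?_map_some h
  rw [PySem.List.mem_pyRange_one] at hm
  exact ⟨by omega, by omega, hr⟩

lemma pvNumeral_get?_self {bound k : Int} (h1 : 1 ≤ k) (h2 : k ≤ bound) :
    PySem.Dict.get?
        ((PySem.List.pyRange 1 (bound + 1)).foldl
          (fun d i => d.insert (PySem.Int.toStr i) i) (⟨[]⟩ : PySem.Dict String Int))
        (PySem.Int.toStr k) = some k := by
  rw [show (PySem.Dict.get?
        ((PySem.List.pyRange 1 (bound + 1)).foldl
          (fun d i => d.insert (PySem.Int.toStr i) i) (⟨[]⟩ : PySem.Dict String Int)))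
      = PySem.Dict.get? (⟨(PySem.List.pyRange 1 (bound + 1)).map
          (fun i => (PySem.Int.toStr i, i))⟩ : PySem.Dict String Int) from by
    funext r; unfold PySem.Dict.get?; rw [pvNumeral_items]]
  exact pvGet?_map_self (by rw [PySem.List.mem_pyRange_one]; omega) (pvKeys_nodup bound)

-- ---- the marking fold ----

lemma pvMark_def (pfx : String) (numeral : PySem.Dict String Int) (seen : List Bool)
    (c : List (String × String)) : pvMark pfx numeral seen c =
    if PySem.Str.startswith ((PySem.Dict.get? ⟨c⟩ "id").getD "") pfx then
      match PySem.Dict.get? numeral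
          (PySem.Str.slice ((PySem.Dict.get? ⟨c⟩ "id").getD "") (some (PySem.Str.len pfx)) none) with
      | some i => seen.set i.toNat true
      | none => seen
    else seen := rfl

lemma pvMark_length (pfx : String) (numeral : PySem.Dict String Int)
    (seen : List Bool) (c : List (String × String)) :
    (pvMark pfx numeral seen c).length = seen.length := by
  rw [pvMark_def]
  by_cases hsw : PySem.Str.startswith ((PySem.Dict.get? ⟨c⟩ "id").getD "") pfx = true
  · rw [if_pos hsw]
    cases hg : PySem.Dict.get? numeral
        (PySem.Str.slice ((PySem.Dict.get? ⟨c⟩ "id").getD "") (some (PySem.Str.len pfx)) none) with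
    | none => rfl
    | some i => simp
  · rw [if_neg hsw]

lemma pvMark_getElem? (pfx : String) (numeral : PySem.Dict String Int)
    (seen : List Bool) (c : List (String × String)) (j : Nat) (hj : j < seen.length) :
    ((pvMark pfx numeral seen c)[j]? = some true)
      ↔ (seen[j]? = some true ∨
          (PySem.Str.startswith ((PySem.Dict.get? ⟨c⟩ "id").getD "") pfx = true ∧
           ∃ i : Int, PySem.Dict.get? numeral
               (PySem.Str.slice ((PySem.Dict.get? ⟨c⟩ "id").getD "")
                 (some (PySem.Str.len pfx)) none) = some i ∧ i.toNat = j)) := by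
  rw [pvMark_def]
  by_cases hsw : PySem.Str.startswith ((PySem.Dict.get? ⟨c⟩ "id").getD "") pfx = true
  · rw [if_pos hsw]
    simp only [hsw, true_and]
    cases hg : PySem.Dict.get? numeral
        (PySem.Str.slice ((PySem.Dict.get? ⟨c⟩ "id").getD "") (some (PySem.Str.len pfx)) none) with
    | none => simp
    | some i =>
      rw [List.getElem?_set]
      by_cases hij : i.toNat = j
      · simp [hij, hj]
      · simp only [hij, if_false]
        constructor
        · exact Or.inl
        · rintro (h | ⟨i', hi', hij'⟩)
          · exact h
          · cases hi'
            exact absurd hij' hij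
  · rw [if_neg hsw]
    simp only [eq_false hsw, false_and, or_false]

lemma pvFold_getElem? (pfx : String) (numeral : PySem.Dict String Int)
    (comps : List (List (String × String))) (seen : List Bool) (j : Nat) (hj : j < seen.length) :
    ((comps.foldl (pvMark pfx numeral) seen)[j]? = some true)
      ↔ (seen[j]? = some true ∨ ∃ c ∈ comps,
          (PySem.Str.startswith ((PySem.Dict.get? ⟨c⟩ "id").getD "") pfx = true ∧
           ∃ i : Int, PySem.Dict.get? numeral
               (PySem.Str.slice ((PySem.Dict.get? ⟨c⟩ "id").getD "")
                 (some (PySem.Str.len pfx)) none) = some i ∧ i.toNat = j)) := by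
  induction comps generalizing seen with
  | nil => simp
  | cons c t ih =>
    rw [List.foldl_cons, ih _ (by rw [pvMark_length]; exact hj),
      pvMark_getElem? pfx numeral seen c j hj]
    simp only [List.mem_cons]
    constructor
    · rintro ((h | h) | ⟨c', hc', h⟩)
      · exact Or.inl h
      · exact Or.inr ⟨c, Or.inl rfl, h⟩
      · exact Or.inr ⟨c', Or.inr hc', h⟩
    · rintro (h | ⟨c', (rfl | hc'), h⟩)
      · exact Or.inl (Or.inl h)
      · exact Or.inl (Or.inr h)
      · exact Or.inr ⟨c', hc', h⟩

-- ---- the two search loops find the least free index ----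

lemma pvLoopA_eq (existing : List String) (pfx : String) (m : Nat)
    (hm : (pfx ++ PySem.Int.toStr ((m : Int) + 1)) ∉ existing)
    (hlt : ∀ j < m, (pfx ++ PySem.Int.toStr ((j : Int) + 1)) ∈ existing) :
    ∀ fuel k, k ≤ m → m < k + fuel →
      pvLoopA existing pfx fuel ((k : Int) + 1) = pfx ++ PySem.Int.toStr ((m : Int) + 1) := by
  intro fuel
  induction fuel with
  | zero => intro k h1 h2; omega
  | succ f ih =>
    intro k h1 h2
    rw [pvLoopA]
    by_cases hk : k = m
    · subst hk; rw [if_neg hm]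
    · rw [if_pos (hlt k (by omega))]
      rw [show ((k : Int) + 1) + 1 = ((k + 1 : Nat) : Int) + 1 by push_cast; ring]
      exact ih (k + 1) (by omega) (by omega)

lemma pvLoopB_eq (seen : List Bool) (m : Nat)
    (hm : (PySem.List.pyGet? seen ((m : Int) + 1)).getD false = false)
    (hlt : ∀ j < m, (PySem.List.pyGet? seen ((j : Int) + 1)).getD false = true) :
    ∀ fuel k, k ≤ m → m < k + fuel →
      pvLoopB seen fuel ((k : Int) + 1) = (m : Int) + 1 := by
  intro fuel
  induction fuel with
  | zero => intro k h1 h2; omega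
  | succ f ih =>
    intro k h1 h2
    rw [pvLoopB]
    by_cases hk : k = m
    · subst hk; rw [hm]; simp
    · rw [hlt k (by omega), if_pos rfl]
      rw [show ((k : Int) + 1) + 1 = ((k + 1 : Nat) : Int) + 1 by push_cast; ring]
      exact ih (k + 1) (by omega) (by omega)

-- ---- pigeonhole facts ----

-- at most `length` candidate strings occur among the ids, so one of 1..length+1 is free
lemma pvFree_exists (pfx : String) (ids : List String) :
    ∃ n : Nat, n < ids.length + 1 ∧ (pfx ++ PySem.Int.toStr ((n : Int) + 1)) ∉ ids := by
  by_contra hc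
  push_neg at hc
  have hsub : (Finset.range (ids.length + 1)).image
      (fun n : Nat => pfx ++ PySem.Int.toStr ((n : Int) + 1)) ⊆ ids.toFinset := by
    intro x hx
    obtain ⟨n, hn, rfl⟩ := Finset.mem_image.mp hx
    exact List.mem_toFinset.mpr (hc n (Finset.mem_range.mp hn))
  have hcard : ids.length + 1 ≤ ids.toFinset.card := by
    calc ids.length + 1 = (Finset.range (ids.length + 1)).card := (Finset.card_range _).symm
    _ = ((Finset.range (ids.length + 1)).image
          (fun n : Nat => pfx ++ PySem.Int.toStr ((n : Int) + 1))).card := by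
        rw [Finset.card_image_of_injOn]
        intro a _ b _ h
        have := pvAppend_toStr_inj pfx (by positivity) (by positivity) h
        omega
    _ ≤ ids.toFinset.card := Finset.card_le_card hsub
  have := List.toFinset_card_le ids
  omega

-- if indices 1..m are all taken in a Nodup list, then m ≤ its length
lemma pvTaken_le (pfx : String) (S : List String) (hnd : S.Nodup) (m : Nat)
    (h : ∀ j < m, (pfx ++ PySem.Int.toStr ((j : Int) + 1)) ∈ S) : m ≤ S.length := by
  have hsub : (Finset.range m).image
      (fun j : Nat => pfx ++ PySem.Int.toStr ((j : Int) + 1)) ⊆ S.toFinset := by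
    intro x hx
    obtain ⟨j, hj, rfl⟩ := Finset.mem_image.mp hx
    exact List.mem_toFinset.mpr (h j (Finset.mem_range.mp hj))
  calc m = (Finset.range m).card := (Finset.card_range _).symm
  _ = ((Finset.range m).image (fun j : Nat => pfx ++ PySem.Int.toStr ((j : Int) + 1))).card := by
      rw [Finset.card_image_of_injOn]
      intro a _ b _ h'
      have := pvAppend_toStr_inj pfx (by positivity) (by positivity) h'
      omega
  _ ≤ S.toFinset.card := Finset.card_le_card hsub
  _ = S.length := List.toFinset_card_of_nodup hnd

-- ===== VERDICT (by name: the statement is the Claim_ definition above) =====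
theorem next_component_id_py_spec : Claim_equal_next_component_id_py := by
  intro comps ct _ _
  unfold Spec_next_component_id_py
  unfold next_component_id_py next_component_id_py_alt
  set pfx := PySem.Dict.getD pvPrefixTable ct "comp" with hpfx
  set ids := comps.map pvGetId with hids
  set L := comps.length with hLdef
  obtain ⟨n0, hn0lt, hn0free⟩ := pvFree_exists pfx ids
  have hex : ∃ n : Nat, (pfx ++ PySem.Int.toStr ((n : Int) + 1)) ∉ ids := ⟨n0, hn0free⟩
  set m := Nat.find hex with hmdef
  have hmfree : (pfx ++ PySem.Int.toStr ((m : Int) + 1)) ∉ ids := Nat.find_spec hex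
  have hmtaken : ∀ j < m, (pfx ++ PySem.Int.toStr ((j : Int) + 1)) ∈ ids :=
    fun j hj => not_not.mp (Nat.find_min hex hj)
  have hidslen : ids.length = L := by rw [hids]; exact List.length_map ..
  have hmL : m ≤ L := by
    have := Nat.find_min' hex hn0free
    omega
  -- the A-side loop
  have hA : pvLoopA (PySem.Set.ofList ids) pfx ((PySem.Set.ofList ids).length + 1) 1
      = pfx ++ PySem.Int.toStr ((m : Int) + 1) := by
    have hfuel : m ≤ (PySem.Set.ofList ids).length :=
      pvTaken_le pfx (PySem.Set.ofList ids) (PySem.Set.nodup_ofList ids) m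
        (fun j hj => (PySem.Set.mem_ofList ids _).mpr (hmtaken j hj))
    rw [show (1 : Int) = ((0 : Nat) : Int) + 1 by norm_num]
    exact pvLoopA_eq (PySem.Set.ofList ids) pfx m
      (fun h => hmfree ((PySem.Set.mem_ofList ids _).mp h))
      (fun j hj => (PySem.Set.mem_ofList ids _).mpr (hmtaken j hj))
      ((PySem.Set.ofList ids).length + 1) 0 (by omega) (by omega)
  -- the B-side data
  set bound : Int := (L : Int) + 1 with hbounddef
  set numeral := (PySem.List.pyRange 1 (bound + 1)).foldl
      (fun d i => d.insert (PySem.Int.toStr i) i) (⟨[]⟩ : PySem.Dict String Int) with hnum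
  set seen0 := PySem.List.pyRepeat [false] (bound + 1) with hseen0def
  have hseen0 : seen0 = List.replicate (L + 2) false := by
    rw [hseen0def, PySem.List.pyRepeat_singleton, show (bound + 1).toNat = L + 2 by omega]
  set seenF := comps.foldl (pvMark pfx numeral) seen0 with hseenFdef
  have hs0len : seen0.length = L + 2 := by rw [hseen0]; simp
  have Hpred : ∀ n : Nat, 1 ≤ n → n ≤ L + 1 →
      ((PySem.List.pyGet? seenF (n : Int)).getD false = true ↔
        (pfx ++ PySem.Int.toStr (n : Int)) ∈ ids) := by
    intro n h1 h2
    have hgd : ∀ o : Option Bool, (o.getD false = true ↔ o = some true) := by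
      rintro (_ | b) <;> simp
    rw [PySem.List.pyGet?_natCast, hgd]
    rw [hseenFdef, pvFold_getElem? pfx numeral comps seen0 n (by omega)]
    have h0 : seen0[n]? = some false := by
      rw [hseen0, List.getElem?_replicate, if_pos (by omega)]
    rw [h0]
    simp only [Option.some.injEq, Bool.false_eq_true, false_or]
    rw [hids, List.mem_map]
    constructor
    · rintro ⟨c, hc, hsw, i, hg, hti⟩
      refine ⟨c, hc, ?_⟩
      obtain ⟨hi1, hi2, hr⟩ := pvNumeral_get?_eq_some (hnum ▸ hg)
      obtain rfl : i = (n : Int) := by omega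
      rw [pvGetId]
      exact (pvDecomp _ pfx _).mp ⟨hsw, hr⟩
    · rintro ⟨c, hc, hid⟩
      rw [pvGetId] at hid
      obtain ⟨hsw, hslice⟩ := (pvDecomp _ pfx _).mpr hid
      refine ⟨c, hc, hsw, (n : Int), ?_, by omega⟩
      rw [hslice, hnum]
      exact pvNumeral_get?_self (by omega) (by omega)
  -- the B-side loop
  have hB : pvLoopB seenF bound.toNat 1 = (m : Int) + 1 := by
    have hmf : (PySem.List.pyGet? seenF ((m : Int) + 1)).getD false = false := by
      have hp := Hpred (m + 1) (by omega) (by omega)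
      rw [show ((m + 1 : Nat) : Int) = (m : Int) + 1 by push_cast; ring] at hp
      cases h : (PySem.List.pyGet? seenF ((m : Int) + 1)).getD false with
      | false => rfl
      | true => exact absurd (hp.mp h) hmfree
    have hml : ∀ j < m, (PySem.List.pyGet? seenF ((j : Int) + 1)).getD false = true := by
      intro j hj
      have hp := Hpred (j + 1) (by omega) (by omega)
      rw [show ((j + 1 : Nat) : Int) = (j : Int) + 1 by push_cast; ring] at hp
      exact hp.mpr (hmtaken j hj)
    rw [show (1 : Int) = ((0 : Nat) : Int) + 1 by norm_num,
      show bound.toNat = L + 1 by omega]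
    exact pvLoopB_eq seenF m hmf hml (L + 1) 0 (by omega) (by omega)
  rw [hA]
  show pfx ++ PySem.Int.toStr ((m : Int) + 1) = pfx ++ PySem.Int.toStr (pvLoopB seenF bound.toNat 1)
  rw [hB]
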